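-- pv_equiv track=rewrite | github.com/kshitijson/PythonProjects | accenture/difference.py | differneceofSum
-- ===== SOURCE A (Python) =====
-- def differneceofSum(m, n):
--
--     divisible = 0
--     not_divisible = 0
--     for i in range(1, m+1):
--         if i % n == 0:
--             divisible += i
--         else:
--             not_divisible += i
--
--     return not_divisible - divisible
-- ===== SOURCE B (Python) =====
-- def differneceofSum(m, n):
--     # Closed form: (sum of 1..m) - 2*(sum of multiples of |n| up to m).
--     if m < 1:
--         return 0
--     k = m // abs(n)
--     return m * (m + 1) // 2 - abs(n) * k * (k + 1)
-- ===== Notes on version B (the rewrite author's own statement) =====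
-- stated objective: faster
-- what changed: Replaced the O(m) loop with closed-form arithmetic-series formulas: total sum m(m+1)/2 minus twice the sum of multiples of |n| (which is |n|*k*(k+1)/2 with k = m//|n|).
import Mathlib
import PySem

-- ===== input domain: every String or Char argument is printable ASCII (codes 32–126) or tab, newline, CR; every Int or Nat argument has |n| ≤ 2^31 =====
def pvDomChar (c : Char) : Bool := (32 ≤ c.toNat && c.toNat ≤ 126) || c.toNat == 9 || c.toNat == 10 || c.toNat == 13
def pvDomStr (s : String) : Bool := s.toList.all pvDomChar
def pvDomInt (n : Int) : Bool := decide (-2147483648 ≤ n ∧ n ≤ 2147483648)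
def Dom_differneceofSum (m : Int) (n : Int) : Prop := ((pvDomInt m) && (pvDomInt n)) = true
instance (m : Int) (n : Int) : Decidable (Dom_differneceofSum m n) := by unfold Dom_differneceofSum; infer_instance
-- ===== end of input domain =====

-- B replaces A's O(m) loop by closed-form arithmetic-series sums (asymptotically faster).


-- ===== PORT A =====
-- literal port of A: loop over range(1, m+1), accumulating (divisible, not_divisible)
def differneceofSum (m : Int) (n : Int) : Int :=
  let p := (PySem.List.pyRange 1 (m + 1) 1).foldl
    (fun (p : Int × Int) i =>
      if PySem.Int.mod i n = 0 then (p.1 + i, p.2) else (p.1, p.2 + i))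
    (0, 0)
  p.2 - p.1

-- ===== PORT B =====
-- literal port of Source B: closed form with floor division
def differneceofSum_alt (m : Int) (n : Int) : Int :=
  if m < 1 then 0
  else
    let k := PySem.Int.floordiv m |n|
    PySem.Int.floordiv (m * (m + 1)) 2 - |n| * k * (k + 1)

-- ===== PRECONDITION & SPEC =====
-- Pre_ excludes n = 0 with m ≥ 1, where Python A (and B) raises ZeroDivisionError.
def Pre_differneceofSum (m : Int) (n : Int) : Prop := n ≠ 0 ∨ m < 1
instance (m : Int) (n : Int) : Decidable (Pre_differneceofSum m n) := by
  unfold Pre_differneceofSum; infer_instance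
def pvWitness_differneceofSum : Int × Int := (10, 3)
def Spec_differneceofSum (m : Int) (n : Int) (out : Int) : Prop := out = differneceofSum_alt m n
instance (m : Int) (n : Int) (out : Int) : Decidable (Spec_differneceofSum m n out) := by
  unfold Spec_differneceofSum; infer_instance

-- ===== CLAIM (what is proved, stated in full; the proofs are below) =====
def Claim_equal_differneceofSum : Prop := ∀ (m : Int) (n : Int), Dom_differneceofSum m n → Pre_differneceofSum m n → Spec_differneceofSum m n (differneceofSum m n)

-- ===== LEMMAS AND PROOFS =====

-- A's fold's answer (nd - d) over any list equals a sum of signed terms.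
theorem pvFold_sub (n : Int) (L : List Int) (d nd : Int) :
    (L.foldl (fun (p : Int × Int) i =>
        if PySem.Int.mod i n = 0 then (p.1 + i, p.2) else (p.1, p.2 + i)) (d, nd)).2
      - (L.foldl (fun (p : Int × Int) i =>
        if PySem.Int.mod i n = 0 then (p.1 + i, p.2) else (p.1, p.2 + i)) (d, nd)).1
    = nd - d + (L.map (fun i => if PySem.Int.mod i n = 0 then -i else i)).sum := by
  induction L generalizing d nd with
  | nil => simp
  | cons x xs ih =>
    simp only [List.foldl_cons, List.map_cons, List.sum_cons]
    by_cases h : PySem.Int.mod x n = 0 <;> simp only [h, if_pos, if_false] <;>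
      rw [ih] <;> ring

theorem pvTri_succ (k : Nat) : (k + 1) * (k + 1 + 1) / 2 = k * (k + 1) / 2 + (k + 1) := by
  have h : (k + 1) * (k + 1 + 1) = k * (k + 1) + (k + 1) * 2 := by ring
  rw [h, Nat.add_mul_div_right _ _ (by norm_num)]

-- the signed sum over 1..k in closed form
theorem pvSum_closed (n : Int) (hn : n ≠ 0) (k : Nat) :
    ((PySem.List.pyRange 1 ((k : Int) + 1) 1).map
        (fun i => if PySem.Int.mod i n = 0 then -i else i)).sum
    = ((k * (k + 1) / 2 : Nat) : Int)
      - (n.natAbs : Int) * ((k / n.natAbs : Nat) : Int) * (((k / n.natAbs : Nat) : Int) + 1) := by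
  induction k with
  | zero => simp [PySem.List.pyRange_one_eq_nil]
  | succ k ih =>
    have hc : ((k + 1 : Nat) : Int) = (k : Int) + 1 := by push_cast; ring
    rw [hc]
    have hsplit : PySem.List.pyRange 1 ((k : Int) + 1 + 1) 1
        = PySem.List.pyRange 1 ((k : Int) + 1) 1 ++ [(k : Int) + 1] := by
      have := PySem.List.pyRange_one_succ_right (a := 1) (b := (k : Int) + 1) (by omega)
      simpa using this
    rw [hsplit, List.map_append, List.sum_append, ih]
    have ha : 0 < n.natAbs := Int.natAbs_pos.mpr hn
    have hdvd : (PySem.Int.mod ((k : Int) + 1) n = 0) ↔ n ∣ ((k : Int) + 1) :=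
      PySem.Int.mod_eq_zero_iff_dvd _ n
    have hdvd2 : n ∣ ((k : Int) + 1) ↔ n.natAbs ∣ (k + 1) := by
      constructor
      · intro h
        have h2 := Int.natAbs_dvd_natAbs.mpr h
        rw [show ((k : Int) + 1).natAbs = k + 1 from by omega] at h2
        exact h2
      · intro h
        have : (n.natAbs : Int) ∣ ((k : Int) + 1) := by exact_mod_cast Int.natCast_dvd_natCast.mpr h
        exact (Int.natAbs_dvd).mp this
    have hsd := Nat.succ_div (a := k) (b := n.natAbs)
    have eTri : (((k + 1) * (k + 1 + 1) / 2 : Nat) : Int)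
        = ((k * (k + 1) / 2 : Nat) : Int) + ((k : Int) + 1) := by
      rw [pvTri_succ k]; push_cast; ring
    by_cases hd : n.natAbs ∣ (k + 1)
    · have hmod : PySem.Int.mod ((k : Int) + 1) n = 0 := hdvd.mpr (hdvd2.mpr hd)
      have hq : (k + 1) / n.natAbs = k / n.natAbs + 1 := by
        rw [hsd]; simp [hd]
      have hkk : k + 1 = n.natAbs * (k / n.natAbs + 1) := by
        have h := Nat.div_mul_cancel hd
        rw [hq] at h
        rw [← h]
        exact Nat.mul_comm _ _
      have hkkZ : (k : Int) + 1 = (n.natAbs : Int) * (((k / n.natAbs : Nat) : Int) + 1) := by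
        exact_mod_cast hkk
      have eQ : (((k + 1) / n.natAbs : Nat) : Int) = ((k / n.natAbs : Nat) : Int) + 1 := by
        rw [hq]; push_cast; ring
      simp only [List.map_cons, List.map_nil, List.sum_cons, List.sum_nil, hmod, if_pos]
      rw [eTri, eQ]
      linear_combination (-2 : Int) * hkkZ
    · have hmod : ¬ PySem.Int.mod ((k : Int) + 1) n = 0 := fun h => hd (hdvd2.mp (hdvd.mp h))
      have hq : (k + 1) / n.natAbs = k / n.natAbs := by
        rw [hsd]; simp [hd]
      have eQ : (((k + 1) / n.natAbs : Nat) : Int) = ((k / n.natAbs : Nat) : Int) := by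
        rw [hq]
      simp only [List.map_cons, List.map_nil, List.sum_cons, List.sum_nil, hmod, if_neg,
        not_false_iff]
      rw [eTri, eQ]
      ring

-- ===== VERDICT (by name: the statement is the Claim_ definition above) =====
theorem differneceofSum_spec : Claim_equal_differneceofSum := by
  intro m n _ hpre
  unfold Spec_differneceofSum differneceofSum differneceofSum_alt
  by_cases hm : m < 1
  · rw [PySem.List.pyRange_one_eq_nil (by omega)]
    simp [hm]
  · have hn : n ≠ 0 := by
      rcases hpre with h | h
      · exact h
      · exact absurd h hm
    have hk : ∃ k : Nat, m = (k : Int) := ⟨m.toNat, by omega⟩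
    obtain ⟨k, rfl⟩ := hk
    simp only [if_neg hm]
    rw [pvFold_sub, pvSum_closed n hn k]
    have habs : |n| = (n.natAbs : Int) := Int.abs_eq_natAbs n
    have h1 : PySem.Int.floordiv ((k : Int) * ((k : Int) + 1)) 2
        = ((k * (k + 1) / 2 : Nat) : Int) := by
      have := PySem.Int.floordiv_natCast (k * (k + 1)) 2
      push_cast at this ⊢
      exact this
    have h2 : PySem.Int.floordiv (k : Int) |n| = ((k / n.natAbs : Nat) : Int) := by
      rw [habs]
      exact_mod_cast PySem.Int.floordiv_natCast k n.natAbs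
    rw [h1, h2, habs]
    ring
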